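-- pv_equiv track=rewrite | github.com/CallMeChewy/MasterMenu | apps/finder/Tests/test_finder_working.py | normalize_operators
-- ===== SOURCE A (Python) =====
-- def normalize_operators(formula):
--     """Direct implementation of normalize_operators for testing"""
--     # Process in order to handle overlapping patterns correctly
--     operator_map = [
--         ('&&', ' AND '),
--         ('||', ' OR '),
--         ('&', ' AND '),
--         ('|', ' OR '),
--         ('!', ' NOT '),
--         ('~', ' NOT '),
--         ('^', ' XOR ')
--     ]
--
--     normalized = formula
--     for symbol, replacement in operator_map:
--         normalized = normalized.replace(symbol, replacement)
--
--     return normalized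
-- ===== SOURCE B (Python) =====
-- def normalize_operators(formula):
--     """Single left-to-right scan: emit the word for the longest operator at each
--     position ('&&'/'||' before '&'/'|'), copying other characters unchanged."""
--     words = {'&&': ' AND ', '||': ' OR ', '&': ' AND ',
--              '|': ' OR ', '!': ' NOT ', '~': ' NOT ', '^': ' XOR '}
--     out = []
--     i = 0
--     n = len(formula)
--     while i < n:
--         two = formula[i:i + 2]
--         if two in ('&&', '||'):
--             out.append(words[two])
--             i += 2
--         else:
--             c = formula[i]
--             out.append(words.get(c, c))
--             i += 1
--     return ''.join(out)
-- ===== Notes on version B (the rewrite author's own statement) =====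
-- stated objective: alternative
-- what changed: Replaces seven sequential full-string str.replace passes with one left-to-right scan that emits the word for the longest operator at each position (&&/|| before &/|) and copies other characters.
import Mathlib
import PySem

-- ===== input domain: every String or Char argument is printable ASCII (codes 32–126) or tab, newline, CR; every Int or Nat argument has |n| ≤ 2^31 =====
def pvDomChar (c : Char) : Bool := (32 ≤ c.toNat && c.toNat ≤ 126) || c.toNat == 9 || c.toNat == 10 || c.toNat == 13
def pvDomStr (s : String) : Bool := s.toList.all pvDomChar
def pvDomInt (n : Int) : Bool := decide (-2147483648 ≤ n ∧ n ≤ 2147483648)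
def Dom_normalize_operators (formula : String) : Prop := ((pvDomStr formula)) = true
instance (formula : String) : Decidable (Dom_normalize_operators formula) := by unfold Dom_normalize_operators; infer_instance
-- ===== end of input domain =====

-- B replaces A's seven sequential str.replace passes by a single left-to-right scan
-- (longest operator first); alternative decomposition, same result.

-- ===== PORT A =====
def normalize_operators (formula : String) : String :=
  let operator_map : List (String × String) :=
    [("&&", " AND "), ("||", " OR "), ("&", " AND "), ("|", " OR "),
     ("!", " NOT "), ("~", " NOT "), ("^", " XOR ")]
  operator_map.foldl (fun normalized sr => PySem.Str.replace normalized sr.1 sr.2) formula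

-- ===== PORT B =====
-- the single left-to-right scan of Source B: two-char operators first, then one-char ones
def pvScanB : List Char → List Char
  | [] => []
  | '&' :: '&' :: t => ' ' :: 'A' :: 'N' :: 'D' :: ' ' :: pvScanB t
  | '|' :: '|' :: t => ' ' :: 'O' :: 'R' :: ' ' :: pvScanB t
  | c :: t =>
      if c = '&' then ' ' :: 'A' :: 'N' :: 'D' :: ' ' :: pvScanB t
      else if c = '|' then ' ' :: 'O' :: 'R' :: ' ' :: pvScanB t
      else if c = '!' then ' ' :: 'N' :: 'O' :: 'T' :: ' ' :: pvScanB t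
      else if c = '~' then ' ' :: 'N' :: 'O' :: 'T' :: ' ' :: pvScanB t
      else if c = '^' then ' ' :: 'X' :: 'O' :: 'R' :: ' ' :: pvScanB t
      else c :: pvScanB t

def normalize_operators_alt (formula : String) : String :=
  String.ofList (pvScanB formula.toList)

-- ===== PRECONDITION & SPEC =====
def Spec_normalize_operators (formula : String) (out : String) : Prop := out = normalize_operators_alt formula
instance (formula : String) (out : String) : Decidable (Spec_normalize_operators formula out) := by unfold Spec_normalize_operators; infer_instance

-- ===== CLAIM (what is proved, stated in full; the proofs are below) =====
def Claim_equal_normalize_operators : Prop := ∀ (formula : String), Dom_normalize_operators formula → Spec_normalize_operators formula (normalize_operators formula)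

-- ===== LEMMAS AND PROOFS =====

set_option maxRecDepth 4096

-- fuel-indexed, accumulator-free version of PySem.Chars.replace.go
def repF (old new : List Char) : Nat → List Char → List Char
  | 0, l => l
  | _ + 1, [] => []
  | fuel + 1, c :: t =>
      if old.isPrefixOf (c :: t) then new ++ repF old new fuel ((c :: t).drop old.length)
      else c :: repF old new fuel t

lemma go_eq_repF (old new : List Char) :
    ∀ fuel (l acc : List Char),
      PySem.Chars.replace.go old new fuel l acc = acc.reverse ++ repF old new fuel l := by
  intro fuel
  induction fuel with
  | zero => intro l acc; simp [PySem.Chars.replace.go, repF]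
  | succ n ih =>
      intro l acc
      cases l with
      | nil => simp [PySem.Chars.replace.go, repF]
      | cons c t =>
          simp only [PySem.Chars.replace.go, repF]
          split
          · rw [ih]; simp
          · rw [ih]; simp

lemma repF_congr (old new : List Char) (hold : old ≠ []) :
    ∀ f1 f2 l, l.length ≤ f1 → l.length ≤ f2 → repF old new f1 l = repF old new f2 l := by
  intro f1
  induction f1 with
  | zero =>
      intro f2 l h1 _
      have : l = [] := List.eq_nil_of_length_eq_zero (Nat.le_zero.mp h1)
      subst this
      cases f2 <;> simp [repF]
  | succ n ih =>
      intro f2 l h1 h2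
      cases l with
      | nil => cases f2 <;> simp [repF]
      | cons c t =>
          have hlen : 1 ≤ old.length := by
            cases old with
            | nil => exact absurd rfl hold
            | cons _ _ => simp
          obtain ⟨g, rfl⟩ : ∃ g, f2 = g + 1 := by
            cases f2 with
            | zero => simp at h2
            | succ g => exact ⟨g, rfl⟩
          have h1' : t.length + 1 ≤ n + 1 := by simpa using h1
          have h2' : t.length + 1 ≤ g + 1 := by simpa using h2
          simp only [repF]
          split
          · congr 1
            apply ih
            · simp only [List.length_drop, List.length_cons]; omega
            · simp only [List.length_drop, List.length_cons]; omega
          · congr 1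
            apply ih
            · omega
            · omega

-- canonical (fuel = length) form
def pvRep (old new l : List Char) : List Char := repF old new l.length l

lemma replace_eq_pvRep (old new l : List Char) (h : old ≠ []) :
    PySem.Chars.replace l old new = pvRep old new l := by
  have : old.isEmpty = false := by cases old <;> simp_all
  simp only [PySem.Chars.replace, this, Bool.false_eq_true, if_false]
  simpa using go_eq_repF old new l.length l []

lemma pvRep_nil (old new : List Char) : pvRep old new [] = [] := rfl

lemma pvRep_cons_not_prefix {old : List Char} (new : List Char) {c : Char} {t : List Char}
    (h : ¬ old.isPrefixOf (c :: t) = true) :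
    pvRep old new (c :: t) = c :: pvRep old new t := by
  show repF old new (t.length + 1) (c :: t) = _
  simp [repF, h, pvRep]

lemma pvRep_cons_prefix {old : List Char} (new : List Char) {c : Char} {t : List Char}
    (hold : old ≠ []) (h : old.isPrefixOf (c :: t) = true) :
    pvRep old new (c :: t) = new ++ pvRep old new ((c :: t).drop old.length) := by
  have hlen : 1 ≤ old.length := by
    cases old with
    | nil => exact absurd rfl hold
    | cons _ _ => simp
  show repF old new (t.length + 1) (c :: t) = _
  simp only [repF, h, if_true]
  congr 1
  apply repF_congr old new hold
  · simp; omega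
  · rfl

lemma pvRep_cons_ne {h0 : Char} {o : List Char} (new : List Char) {c : Char} {t : List Char}
    (h : c ≠ h0) : pvRep (h0 :: o) new (c :: t) = c :: pvRep (h0 :: o) new t := by
  apply pvRep_cons_not_prefix
  simp [List.isPrefixOf]
  intro hc
  exact absurd hc.symm h

lemma pvRep_append_pass {h0 : Char} {o : List Char} (new : List Char) (w : List Char)
    (hw : ∀ c ∈ w, c ≠ h0) (X : List Char) :
    pvRep (h0 :: o) new (w ++ X) = w ++ pvRep (h0 :: o) new X := by
  induction w with
  | nil => rfl
  | cons a w ih =>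
      simp only [List.cons_append]
      rw [pvRep_cons_ne new (hw a (by simp)), ih (fun c hc => hw c (by simp [hc]))]

-- the word lists
def wAND : List Char := [' ', 'A', 'N', 'D', ' ']
def wOR : List Char := [' ', 'O', 'R', ' ']
def wNOT : List Char := [' ', 'N', 'O', 'T', ' ']
def wXOR : List Char := [' ', 'X', 'O', 'R', ' ']

-- A's seven replaces, composed, on the list side
def chainR (s : List Char) : List Char :=
  pvRep ['^'] wXOR (pvRep ['~'] wNOT (pvRep ['!'] wNOT (pvRep ['|'] wOR
    (pvRep ['&'] wAND (pvRep ['|', '|'] wOR (pvRep ['&', '&'] wAND s))))))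

lemma chain_word (w : List Char)
    (hw : ∀ c ∈ w, c ≠ '&' ∧ c ≠ '|' ∧ c ≠ '!' ∧ c ≠ '~' ∧ c ≠ '^') (X : List Char) :
    pvRep ['^'] wXOR (pvRep ['~'] wNOT (pvRep ['!'] wNOT (pvRep ['|'] wOR (pvRep ['&'] wAND (w ++ X))))) =
      w ++ pvRep ['^'] wXOR (pvRep ['~'] wNOT (pvRep ['!'] wNOT (pvRep ['|'] wOR (pvRep ['&'] wAND X)))) := by
  rw [pvRep_append_pass wAND w (fun c hc => (hw c hc).1),
      pvRep_append_pass wOR w (fun c hc => (hw c hc).2.1),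
      pvRep_append_pass wNOT w (fun c hc => (hw c hc).2.2.1),
      pvRep_append_pass wNOT w (fun c hc => (hw c hc).2.2.2.1),
      pvRep_append_pass wXOR w (fun c hc => (hw c hc).2.2.2.2)]

-- one chain step per shape of the input's head
lemma chain_cons_other (c : Char) (t : List Char) (h1 : c ≠ '&') (h2 : c ≠ '|')
    (h3 : c ≠ '!') (h4 : c ≠ '~') (h5 : c ≠ '^') :
    chainR (c :: t) = c :: chainR t := by
  unfold chainR
  rw [pvRep_cons_ne wAND h1, pvRep_cons_ne wOR h2, pvRep_cons_ne wAND h1,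
      pvRep_cons_ne wOR h2, pvRep_cons_ne wNOT h3, pvRep_cons_ne wNOT h4,
      pvRep_cons_ne wXOR h5]

lemma chain_cons_amp2 (t : List Char) : chainR ('&' :: '&' :: t) = wAND ++ chainR t := by
  unfold chainR
  rw [pvRep_cons_prefix wAND (by simp) (by simp [List.isPrefixOf])]
  simp only [List.length_cons, List.length_nil, List.drop_succ_cons, List.drop_zero]
  rw [pvRep_append_pass wOR wAND (by simp [wAND])]
  rw [chain_word wAND (by simp [wAND])]

lemma chain_cons_amp1 (t : List Char) (h : ¬ (['&', '&'].isPrefixOf ('&' :: t)) = true) :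
    chainR ('&' :: t) = wAND ++ chainR t := by
  unfold chainR
  rw [pvRep_cons_not_prefix wAND h, pvRep_cons_ne wOR (by decide),
      pvRep_cons_prefix wAND (by simp) (by simp [List.isPrefixOf])]
  simp only [List.length_cons, List.length_nil, List.drop_succ_cons, List.drop_zero]
  rw [pvRep_append_pass wOR wAND (by simp [wAND]), pvRep_append_pass wNOT wAND (by simp [wAND]),
      pvRep_append_pass wNOT wAND (by simp [wAND]), pvRep_append_pass wXOR wAND (by simp [wAND])]

lemma chain_cons_bar2 (t : List Char) : chainR ('|' :: '|' :: t) = wOR ++ chainR t := by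
  unfold chainR
  rw [pvRep_cons_ne wAND (by decide), pvRep_cons_ne wAND (by decide),
      pvRep_cons_prefix wOR (by simp) (by simp [List.isPrefixOf])]
  simp only [List.length_cons, List.length_nil, List.drop_succ_cons, List.drop_zero]
  rw [chain_word wOR (by simp [wOR])]

lemma not_bar_prefix (t : List Char) (h : ∀ d t', t = d :: t' → d ≠ '|') :
    ¬ (['|', '|'].isPrefixOf ('|' :: pvRep ['&', '&'] wAND t)) = true := by
  cases t with
  | nil => simp [pvRep_nil, List.isPrefixOf]
  | cons d t' =>
      have hd := h d t' rfl
      by_cases hp : (['&', '&'].isPrefixOf (d :: t')) = true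
      · rw [pvRep_cons_prefix wAND (by simp) hp]
        simp [List.isPrefixOf, wAND]
      · rw [pvRep_cons_not_prefix wAND hp]
        simp [List.isPrefixOf, Ne.symm hd]

lemma chain_cons_bar1 (t : List Char) (h : ∀ d t', t = d :: t' → d ≠ '|') :
    chainR ('|' :: t) = wOR ++ chainR t := by
  unfold chainR
  rw [pvRep_cons_ne wAND (by decide), pvRep_cons_not_prefix wOR (not_bar_prefix t h),
      pvRep_cons_ne wAND (by decide),
      pvRep_cons_prefix wOR (by simp) (by simp [List.isPrefixOf])]
  simp only [List.length_cons, List.length_nil, List.drop_succ_cons, List.drop_zero]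
  rw [pvRep_append_pass wNOT wOR (by simp [wOR]), pvRep_append_pass wNOT wOR (by simp [wOR]),
      pvRep_append_pass wXOR wOR (by simp [wOR])]

lemma chain_cons_bang (t : List Char) : chainR ('!' :: t) = wNOT ++ chainR t := by
  unfold chainR
  rw [pvRep_cons_ne wAND (by decide), pvRep_cons_ne wOR (by decide),
      pvRep_cons_ne wAND (by decide), pvRep_cons_ne wOR (by decide),
      pvRep_cons_prefix wNOT (by simp) (by simp [List.isPrefixOf])]
  simp only [List.length_cons, List.length_nil, List.drop_succ_cons, List.drop_zero]
  rw [pvRep_append_pass wNOT wNOT (by simp [wNOT]), pvRep_append_pass wXOR wNOT (by simp [wNOT])]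

lemma chain_cons_tilde (t : List Char) : chainR ('~' :: t) = wNOT ++ chainR t := by
  unfold chainR
  rw [pvRep_cons_ne wAND (by decide), pvRep_cons_ne wOR (by decide),
      pvRep_cons_ne wAND (by decide), pvRep_cons_ne wOR (by decide),
      pvRep_cons_ne wNOT (by decide),
      pvRep_cons_prefix wNOT (by simp) (by simp [List.isPrefixOf])]
  simp only [List.length_cons, List.length_nil, List.drop_succ_cons, List.drop_zero]
  rw [pvRep_append_pass wXOR wNOT (by simp [wNOT])]

lemma chain_cons_caret (t : List Char) : chainR ('^' :: t) = wXOR ++ chainR t := by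
  unfold chainR
  rw [pvRep_cons_ne wAND (by decide), pvRep_cons_ne wOR (by decide),
      pvRep_cons_ne wAND (by decide), pvRep_cons_ne wOR (by decide),
      pvRep_cons_ne wNOT (by decide), pvRep_cons_ne wNOT (by decide),
      pvRep_cons_prefix wXOR (by simp) (by simp [List.isPrefixOf])]
  simp only [List.length_cons, List.length_nil, List.drop_succ_cons, List.drop_zero]

lemma chain_eq_scan : ∀ n (s : List Char), s.length ≤ n → chainR s = pvScanB s := by
  intro n
  induction n with
  | zero =>
      intro s h
      have : s = [] := List.eq_nil_of_length_eq_zero (Nat.le_zero.mp h)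
      subst this; rfl
  | succ n ih =>
      intro s hs
      match s with
      | [] => rfl
      | c :: t =>
          have ht : t.length ≤ n := by simpa using hs
          by_cases h1 : c = '&'
          · subst h1
            match t with
            | [] =>
                rw [chain_cons_amp1 [] (by simp [List.isPrefixOf])]
                rfl
            | d :: t' =>
                by_cases hd : d = '&'
                · subst hd
                  have ht' : t'.length ≤ n := by simp at hs; omega
                  rw [chain_cons_amp2, ih t' ht']
                  simp [pvScanB, wAND]
                · rw [chain_cons_amp1 _ (by simp [List.isPrefixOf, Ne.symm hd]), ih _ ht]
                  simp [pvScanB, hd, wAND]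
          · by_cases h2 : c = '|'
            · subst h2
              match t with
              | [] =>
                  rw [chain_cons_bar1 [] (by intro e t'' he; simp at he)]
                  rfl
              | d :: t' =>
                  by_cases hd : d = '|'
                  · subst hd
                    have ht' : t'.length ≤ n := by simp at hs; omega
                    rw [chain_cons_bar2, ih t' ht']
                    simp [pvScanB, wOR]
                  · rw [chain_cons_bar1 _ (by intro e t'' he; cases he; exact hd), ih _ ht]
                    simp [pvScanB, hd, wOR]
            · by_cases h3 : c = '!'
              · subst h3
                rw [chain_cons_bang, ih t ht]
                simp [pvScanB, wNOT]
              · by_cases h4 : c = '~'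
                · subst h4
                  rw [chain_cons_tilde, ih t ht]
                  simp [pvScanB, wNOT]
                · by_cases h5 : c = '^'
                  · subst h5
                    rw [chain_cons_caret, ih t ht]
                    simp [pvScanB, wXOR]
                  · rw [chain_cons_other c t h1 h2 h3 h4 h5, ih t ht]
                    simp [pvScanB, h1, h2, h3, h4, h5]

lemma toList_chain (s : String) :
    (normalize_operators s).toList = chainR s.toList := by
  have e1 : ("&&" : String).toList = ['&', '&'] := rfl
  have e2 : ("||" : String).toList = ['|', '|'] := rfl
  have e3 : ("&" : String).toList = ['&'] := rfl
  have e4 : ("|" : String).toList = ['|'] := rfl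
  have e5 : ("!" : String).toList = ['!'] := rfl
  have e6 : ("~" : String).toList = ['~'] := rfl
  have e7 : ("^" : String).toList = ['^'] := rfl
  have f1 : (" AND " : String).toList = wAND := rfl
  have f2 : (" OR " : String).toList = wOR := rfl
  have f3 : (" NOT " : String).toList = wNOT := rfl
  have f4 : (" XOR " : String).toList = wXOR := rfl
  simp only [normalize_operators, List.foldl, PySem.Str.toList_replace,
    e1, e2, e3, e4, e5, e6, e7, f1, f2, f3, f4]
  rw [replace_eq_pvRep _ _ _ (by decide), replace_eq_pvRep _ _ _ (by decide),
      replace_eq_pvRep _ _ _ (by decide), replace_eq_pvRep _ _ _ (by decide),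
      replace_eq_pvRep _ _ _ (by decide), replace_eq_pvRep _ _ _ (by decide),
      replace_eq_pvRep _ _ _ (by decide)]
  rfl

-- ===== VERDICT (by name: the statement is the Claim_ definition above) =====
theorem normalize_operators_spec : Claim_equal_normalize_operators := by
  intro formula _
  unfold Spec_normalize_operators normalize_operators_alt
  have h := toList_chain formula
  rw [chain_eq_scan formula.toList.length _ le_rfl] at h
  calc normalize_operators formula
      = String.ofList ((normalize_operators formula).toList) := (String.ofList_toList (s := normalize_operators formula)).symm
    _ = String.ofList (pvScanB formula.toList) := by rw [h]
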